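-- pv_equiv track=rewrite | github.com/ZQSIAT/data_preprocessing | address_label.py | replace_time_windows_judgment
-- ===== SOURCE A (Python) =====
-- def replace_time_windows_judgment(action_order=None, action_order_array=None, your_judgement='1', final_label=None):
--     """
--     Manually specify that the time window judgement for certain actions is determined to be 1 or 2.
--     :param action_order:The action order that you want to replace i.e., '1'-'67'.
--     :param your_judgement:Your judgement i.e., 1 or 2.
--     :param action_order_array:The action order array that you want to replace i.e., ['1','4','67'].
--     :param final_label:Labels that are not action coded with a list type.
--     :return:Time windows judgement replaced label data with a list type.
--     """
--     list_final_label = final_label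
--     if action_order_array is None and action_order is not None and final_label is not None:
--         for i, i_content in enumerate(final_label):
--             if i_content[0] == action_order:
--                 list_final_label[i][3] = your_judgement
--                 pass
--             pass
--         pass
--     if action_order_array is not None and action_order is None and final_label is not None:
--         for i, i_content in enumerate(final_label):
--             for j in action_order_array:
--                 if i_content[0] == j:
--                     list_final_label[i][3] = your_judgement
--                     pass
--                 pass
--             pass
--         pass
--     return list_final_label
--     pass
-- ===== SOURCE B (Python) =====
-- def replace_time_windows_judgment(action_order=None, action_order_array=None, your_judgement='1', final_label=None):
--     """Inverted traversal: build an index from action code to row positions once,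
--     then touches only the rows of the requested codes (return value and in-place
--     mutation of final_label match the original)."""
--     if action_order_array is None and action_order is not None:
--         targets = [action_order]
--     elif action_order_array is not None and action_order is None:
--         targets = action_order_array
--     else:
--         targets = []
--     if final_label is None or not targets:
--         return final_label
--     index = {}
--     for i, row in enumerate(final_label):
--         index.setdefault(row[0], []).append(i)
--     for t in targets:
--         for i in index.get(t, []):
--             final_label[i][3] = your_judgement
--     return final_label
-- ===== Notes on version B (the rewrite author's own statement) =====
-- stated objective: alternative
-- what changed: Instead of A's two guarded row scans (the array case re-checking every target code for every row), B builds a dict index from action code to row positions in one pass and then writes the judgement only at the positions looked up for each target code; the inner per-row scan over the array disappears.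
-- outside the precondition, e.g. on replace_time_windows_judgment(None, ['1'], '9', [[]]): A raises IndexError, B raises IndexError
import Mathlib
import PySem

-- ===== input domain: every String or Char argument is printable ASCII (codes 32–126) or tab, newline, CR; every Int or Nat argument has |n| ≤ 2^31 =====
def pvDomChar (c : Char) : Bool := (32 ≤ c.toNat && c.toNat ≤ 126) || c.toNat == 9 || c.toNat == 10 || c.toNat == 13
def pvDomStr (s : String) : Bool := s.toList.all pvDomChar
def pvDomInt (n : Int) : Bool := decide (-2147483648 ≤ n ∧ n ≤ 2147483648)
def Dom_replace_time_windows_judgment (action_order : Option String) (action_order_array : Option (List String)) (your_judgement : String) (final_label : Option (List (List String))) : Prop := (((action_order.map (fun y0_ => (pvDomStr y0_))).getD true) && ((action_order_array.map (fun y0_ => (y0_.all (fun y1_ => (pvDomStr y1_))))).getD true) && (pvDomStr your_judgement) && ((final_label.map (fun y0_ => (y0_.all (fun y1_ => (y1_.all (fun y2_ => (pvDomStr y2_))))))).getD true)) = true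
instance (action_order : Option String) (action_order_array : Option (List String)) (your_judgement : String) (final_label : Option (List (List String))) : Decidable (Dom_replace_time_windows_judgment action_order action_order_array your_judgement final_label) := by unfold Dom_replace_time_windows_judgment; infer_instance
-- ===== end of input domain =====

-- B replaces A's guarded row scans (with a per-row inner scan of the target array) by a
-- dict index from action code to row positions built in one pass; equivalence is about the
-- RETURN value (both Pythons also mutate final_label in place in the same way).

-- ===== PORT A =====
-- Literal port of A. Python raises IndexError on i_content[0] of an empty row and on
-- list_final_label[i][3] = j for a matched row shorter than 4; the total primitives
-- pyGetD/pySetD are exact only inside Pre_, which excludes exactly those inputs.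
def replace_time_windows_judgment (action_order : Option String) (action_order_array : Option (List String)) (your_judgement : String) (final_label : Option (List (List String))) : Option (List (List String)) :=
  match final_label with
  | none => none
  | some l =>
    match action_order, action_order_array with
    | some o, none =>
      -- for i, i_content in enumerate(final_label): if i_content[0] == action_order: list_final_label[i][3] = your_judgement
      some ((PySem.List.enumerate l 0).foldl
        (fun st p => if PySem.List.pyGetD p.2 0 "" == o
                     then PySem.List.pySetD st p.1 (PySem.List.pySetD p.2 3 your_judgement)
                     else st) l)
    | none, some arr =>
      -- for i, i_content in enumerate(final_label): for jc in action_order_array: if i_content[0] == jc: list_final_label[i][3] = your_judgement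
      some ((PySem.List.enumerate l 0).foldl
        (fun st p => arr.foldl
          (fun st2 t => if PySem.List.pyGetD p.2 0 "" == t
                        then PySem.List.pySetD st2 p.1 (PySem.List.pySetD p.2 3 your_judgement)
                        else st2) st) l)
    | _, _ => some l

-- ===== PORT B =====
-- Literal port of B (Source B): targets, then a dict index code -> row positions, then
-- writes only at the indexed positions of each target.
def replace_time_windows_judgment_alt (action_order : Option String) (action_order_array : Option (List String)) (your_judgement : String) (final_label : Option (List (List String))) : Option (List (List String)) :=
  -- if aoa is None and ao is not None: [ao]  elif aoa is not None and ao is None: aoa  else: []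
  let targets : List String :=
    if action_order_array.isNone then action_order.toList
    else if action_order.isNone then action_order_array.getD []
    else []
  -- if final_label is None or not targets: return final_label
  final_label.map (fun l =>
    if targets.isEmpty then l
    else
      -- index.setdefault(row[0], []).append(i)
      let index : PySem.Dict String (List Int) :=
        (PySem.List.enumerate l 0).foldl
          (fun d p => d.modify (PySem.List.pyGetD p.2 0 "") [] (fun v => v ++ [p.1]))
          PySem.Dict.empty
      -- for t in targets: for i in index.get(t, []): final_label[i][3] = your_judgement
      targets.foldl
        (fun st t => (index.getD t []).foldl
          (fun st2 i => PySem.List.pySetD st2 i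
            (PySem.List.pySetD (PySem.List.pyGetD st2 i []) 3 your_judgement)) st) l)

-- ===== PRECONDITION & SPEC =====
-- The target codes A's guards select (empty when both or neither argument is given).
def pvTargets (action_order : Option String) (action_order_array : Option (List String)) : List String :=
  if action_order_array.isNone then action_order.toList
  else if action_order.isNone then action_order_array.getD []
  else []

-- Pre_ excludes exactly the inputs where Python A raises IndexError: when some rows are
-- scanned (targets non-empty), every row must be non-empty, and every row whose code is a
-- target must have at least 4 fields so that row[3] = your_judgement succeeds.
def Pre_replace_time_windows_judgment (action_order : Option String) (action_order_array : Option (List String)) (your_judgement : String) (final_label : Option (List (List String))) : Prop :=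
  pvTargets action_order action_order_array = [] ∨
    ∀ row ∈ final_label.getD [], row ≠ [] ∧
      (PySem.List.pyGetD row 0 "" ∈ pvTargets action_order action_order_array → 4 ≤ row.length)
instance (action_order : Option String) (action_order_array : Option (List String)) (your_judgement : String) (final_label : Option (List (List String))) : Decidable (Pre_replace_time_windows_judgment action_order action_order_array your_judgement final_label) := by unfold Pre_replace_time_windows_judgment; infer_instance

def pvWitness_replace_time_windows_judgment : Option String × Option (List String) × String × Option (List (List String)) :=
  (some "1", none, "2", some [["1", "a", "b", "0"], ["3", "c", "d", "0"]])

def Spec_replace_time_windows_judgment (action_order : Option String) (action_order_array : Option (List String)) (your_judgement : String) (final_label : Option (List (List String))) (out : Option (List (List String))) : Prop := out = replace_time_windows_judgment_alt action_order action_order_array your_judgement final_label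
instance (action_order : Option String) (action_order_array : Option (List String)) (your_judgement : String) (final_label : Option (List (List String))) (out : Option (List (List String))) : Decidable (Spec_replace_time_windows_judgment action_order action_order_array your_judgement final_label out) := by unfold Spec_replace_time_windows_judgment; infer_instance

-- ===== CLAIM (what is proved, stated in full; the proofs are below) =====
def Claim_equal_replace_time_windows_judgment : Prop := ∀ (action_order : Option String) (action_order_array : Option (List String)) (your_judgement : String) (final_label : Option (List (List String))), Dom_replace_time_windows_judgment action_order action_order_array your_judgement final_label → Pre_replace_time_windows_judgment action_order action_order_array your_judgement final_label → Spec_replace_time_windows_judgment action_order action_order_array your_judgement final_label (replace_time_windows_judgment action_order action_order_array your_judgement final_label)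

-- ===== LEMMAS AND PROOFS =====

-- row with row[3] := j (the value both programs write)
def pvVrow (j : String) (row : List String) : List String := PySem.List.pySetD row 3 j

-- the common normal form of both loops: rewrite field 3 of every row whose code is a target
def pvCanon (T : List String) (j : String) (l : List (List String)) : List (List String) :=
  l.map (fun row => if PySem.List.pyGetD row 0 "" ∈ T then pvVrow j row else row)

theorem pvSetD_idem {α : Type} (st : List α) (i : Int) (v : α) :
    PySem.List.pySetD (PySem.List.pySetD st i v) i v = PySem.List.pySetD st i v := by
  cases h : PySem.List.pyIdx? st.length i with
  | none => simp [PySem.List.pySetD, PySem.List.pySet?, h]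
  | some k => simp [PySem.List.pySetD, PySem.List.pySet?, h, List.length_set, List.set_set]

theorem pvVrow_idem (j : String) (row : List String) : pvVrow j (pvVrow j row) = pvVrow j row :=
  pvSetD_idem row 3 j

-- one enumerate pass writing at position i a value depending only on the original row
theorem pvPass_aux (cond : List String → Bool) (j : String) :
    ∀ (l pre : List (List String)),
      (PySem.List.enumerate l (pre.length : Int)).foldl
        (fun st p => if cond p.2 then PySem.List.pySetD st p.1 (pvVrow j p.2) else st) (pre ++ l)
      = pre ++ l.map (fun row => if cond row then pvVrow j row else row) := by
  intro l
  induction l with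
  | nil => intro pre; simp [PySem.List.enumerate_nil]
  | cons x l ih =>
    intro pre
    rw [PySem.List.enumerate_cons]
    have hset : (if cond x then PySem.List.pySetD (pre ++ x :: l) (pre.length : Int) (pvVrow j x) else (pre ++ x :: l))
        = (pre ++ [if cond x then pvVrow j x else x]) ++ l := by
      by_cases hc : cond x <;> simp [hc, PySem.List.pySetD_natCast]
    have hlen : ((pre.length : Int) + 1) = (((pre ++ [if cond x then pvVrow j x else x]).length : Int)) := by
      simp
    simp only [List.foldl_cons, hset]
    rw [hlen, ih]
    by_cases hc : cond x <;> simp [hc]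

theorem pvPass (cond : List String → Bool) (j : String) (l : List (List String)) :
    (PySem.List.enumerate l 0).foldl
      (fun st p => if cond p.2 then PySem.List.pySetD st p.1 (pvVrow j p.2) else st) l
    = l.map (fun row => if cond row then pvVrow j row else row) := by
  simpa using pvPass_aux cond j l []

-- A's inner scan over the array collapses to a single membership-guarded write
theorem pvInner (j : String) (row : List String) (i : Int) :
    ∀ (arr : List String) (st : List (List String)),
      arr.foldl (fun st2 t => if PySem.List.pyGetD row 0 "" == t
                              then PySem.List.pySetD st2 i (pvVrow j row) else st2) st
      = if PySem.List.pyGetD row 0 "" ∈ arr then PySem.List.pySetD st i (pvVrow j row) else st := by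
  intro arr
  induction arr with
  | nil => intro st; simp
  | cons t arr ih =>
    intro st
    simp only [List.foldl_cons]
    by_cases h : PySem.List.pyGetD row 0 "" = t
    · subst h
      simp only [BEq.rfl, ih]
      by_cases hm : PySem.List.pyGetD row 0 "" ∈ arr <;> simp [hm, pvSetD_idem]
    · have hb : (PySem.List.pyGetD row 0 "" == t) = false := by simp [h]
      simp only [hb, Bool.false_eq_true, if_false, ih]
      by_cases hm : PySem.List.pyGetD row 0 "" ∈ arr <;> simp [hm, h]

-- the dict index lists exactly the positions of the rows carrying code t, in order
theorem pvIdx_getD (l : List (List String)) (t : String) :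
    ((PySem.List.enumerate l 0).foldl
        (fun d p => d.modify (PySem.List.pyGetD p.2 0 "") [] (fun v => v ++ [p.1]))
        PySem.Dict.empty).getD t []
    = ((PySem.List.enumerate l 0).filter
        (fun p => PySem.List.pyGetD p.2 0 "" == t)).map (fun p => p.1) := by
  have h1 : ((PySem.List.enumerate l 0).map (fun p => (PySem.List.pyGetD p.2 0 "", p.1))).foldl
      (fun d q => d.modify q.1 [] (fun v => v ++ [q.2])) PySem.Dict.empty
      = (PySem.List.enumerate l 0).foldl
        (fun d p => d.modify (PySem.List.pyGetD p.2 0 "") [] (fun v => v ++ [p.1]))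
        PySem.Dict.empty := by
    rw [List.foldl_map]
  rw [← h1, PySem.Dict.getD_foldl_modify_append]
  simp [List.filter_map, List.map_map, Function.comp_def]

theorem pvWrites (j : String) :
    ∀ (is : List Int) (st : List (List String)),
      (∀ i ∈ is, ∃ k : Nat, k < st.length ∧ i = (k : Int)) →
      ∀ k : Nat,
        (is.foldl (fun st2 i => PySem.List.pySetD st2 i
            (PySem.List.pySetD (PySem.List.pyGetD st2 i []) 3 j)) st)[k]?
        = if (k : Int) ∈ is then (st[k]?).map (pvVrow j) else st[k]? := by
  intro is
  induction is with
  | nil => intro st _ k; simp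
  | cons i is ih =>
    intro st hv k
    obtain ⟨k0, hk0, rfl⟩ := hv i (List.mem_cons_self ..)
    have hget : PySem.List.pyGetD st (k0 : Int) [] = st[k0] := by
      rw [PySem.List.pyGetD_natCast]; exact List.getD_eq_getElem st [] hk0
    have hst' : PySem.List.pySetD st (k0 : Int)
        (PySem.List.pySetD (PySem.List.pyGetD st (k0 : Int) []) 3 j)
        = st.set k0 (pvVrow j st[k0]) := by
      rw [hget, PySem.List.pySetD_natCast]; rfl
    simp only [List.foldl_cons, hst']
    have hv' : ∀ i ∈ is, ∃ k' : Nat, k' < (st.set k0 (pvVrow j st[k0])).length ∧ i = (k' : Int) := by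
      intro i hi
      obtain ⟨k', h1, h2⟩ := hv i (List.mem_cons_of_mem _ hi)
      exact ⟨k', by simpa using h1, h2⟩
    rw [ih _ hv' k]
    by_cases hk : k = k0
    · subst hk
      have h1 : (st.set k (pvVrow j st[k]))[k]? = some (pvVrow j st[k]) := by
        simp [List.getElem?_set_self', List.getElem?_eq_getElem hk0]
      by_cases hm : (k : Int) ∈ is <;>
        simp [hm, h1, List.getElem?_eq_getElem hk0, pvVrow_idem]
    · have h2 : (st.set k0 (pvVrow j st[k0]))[k]? = st[k]? := by
        rw [List.getElem?_set_ne (by omega)]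
      have hne : ((k : Int) ∈ ((k0 : Int) :: is)) ↔ ((k : Int) ∈ is) := by
        simp; intro h; omega
      by_cases hm : (k : Int) ∈ is <;> simp [hm, h2, hne]

-- A, first guard: the single scan is the normal form with the one-element target list
theorem pvA1 (o j : String) (l : List (List String)) :
    (PySem.List.enumerate l 0).foldl
      (fun st p => if PySem.List.pyGetD p.2 0 "" == o
                   then PySem.List.pySetD st p.1 (PySem.List.pySetD p.2 3 j) else st) l
    = pvCanon [o] j l := by
  refine (pvPass (fun row => PySem.List.pyGetD row 0 "" == o) j l).trans ?_
  unfold pvCanon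
  apply List.map_congr_left
  intro row _
  by_cases h : PySem.List.pyGetD row 0 "" = o <;> simp [h]

-- A, second guard: the nested scan is the normal form with the array as target list
theorem pvA2 (arr : List String) (j : String) (l : List (List String)) :
    (PySem.List.enumerate l 0).foldl
      (fun st p => arr.foldl
        (fun st2 t => if PySem.List.pyGetD p.2 0 "" == t
                      then PySem.List.pySetD st2 p.1 (PySem.List.pySetD p.2 3 j) else st2) st) l
    = pvCanon arr j l := by
  have hstep : (fun (st : List (List String)) (p : Int × List String) => arr.foldl
        (fun st2 t => if PySem.List.pyGetD p.2 0 "" == t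
                      then PySem.List.pySetD st2 p.1 (PySem.List.pySetD p.2 3 j) else st2) st)
      = (fun (st : List (List String)) (p : Int × List String) =>
        if (fun row => decide (PySem.List.pyGetD row 0 "" ∈ arr)) p.2
        then PySem.List.pySetD st p.1 (pvVrow j p.2) else st) := by
    funext st p
    refine (pvInner j p.2 p.1 arr st).trans ?_
    by_cases h : PySem.List.pyGetD p.2 0 "" ∈ arr <;> simp [h]
  rw [hstep]
  refine (pvPass (fun row => decide (PySem.List.pyGetD row 0 "" ∈ arr)) j l).trans ?_
  unfold pvCanon
  apply List.map_congr_left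
  intro row _
  by_cases h : PySem.List.pyGetD row 0 "" ∈ arr <;> simp [h]

-- B's write loops over the dict index produce the same normal form
theorem pvB (T : List String) (j : String) (l : List (List String)) :
    T.foldl (fun st t =>
      ((((PySem.List.enumerate l 0).foldl
          (fun d p => d.modify (PySem.List.pyGetD p.2 0 "") [] (fun v => v ++ [p.1]))
          PySem.Dict.empty)).getD t []).foldl
        (fun st2 i => PySem.List.pySetD st2 i
          (PySem.List.pySetD (PySem.List.pyGetD st2 i []) 3 j)) st) l
    = pvCanon T j l := by
  have hflat : T.foldl (fun st t =>
      ((((PySem.List.enumerate l 0).foldl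
          (fun d p => d.modify (PySem.List.pyGetD p.2 0 "") [] (fun v => v ++ [p.1]))
          PySem.Dict.empty)).getD t []).foldl
        (fun st2 i => PySem.List.pySetD st2 i
          (PySem.List.pySetD (PySem.List.pyGetD st2 i []) 3 j)) st) l
      = ((T.map (fun t => (((PySem.List.enumerate l 0).foldl
          (fun d p => d.modify (PySem.List.pyGetD p.2 0 "") [] (fun v => v ++ [p.1]))
          PySem.Dict.empty)).getD t [])).flatten).foldl
        (fun st2 i => PySem.List.pySetD st2 i
          (PySem.List.pySetD (PySem.List.pyGetD st2 i []) 3 j)) l := by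
    rw [List.foldl_flatten, List.foldl_map]
  rw [hflat]
  have hmem : ∀ i : Int, i ∈ (T.map (fun t => (((PySem.List.enumerate l 0).foldl
          (fun d p => d.modify (PySem.List.pyGetD p.2 0 "") [] (fun v => v ++ [p.1]))
          PySem.Dict.empty)).getD t [])).flatten
      ↔ ∃ k : Nat, k < l.length ∧ i = (k : Int) ∧ PySem.List.pyGetD (l.getD k []) 0 "" ∈ T := by
    intro i
    simp only [List.mem_flatten, List.mem_map]
    constructor
    · rintro ⟨L, ⟨t, ht, rfl⟩, hiL⟩
      rw [pvIdx_getD] at hiL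
      simp only [List.mem_map, List.mem_filter, PySem.List.mem_enumerate_iff] at hiL
      obtain ⟨p, ⟨⟨k, hk, rfl⟩, hpt⟩, rfl⟩ := hiL
      refine ⟨k, hk, by simp, ?_⟩
      simp only [beq_iff_eq] at hpt
      rw [List.getD_eq_getElem l [] hk]
      simpa [hpt] using ht
    · rintro ⟨k, hk, rfl, hin⟩
      refine ⟨_, ⟨PySem.List.pyGetD (l.getD k []) 0 "", hin, rfl⟩, ?_⟩
      rw [pvIdx_getD]
      simp only [List.mem_map, List.mem_filter, PySem.List.mem_enumerate_iff]
      refine ⟨((k : Int), l[k]), ⟨⟨k, hk, by simp⟩, ?_⟩, rfl⟩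
      rw [List.getD_eq_getElem l [] hk]
      simp
  have hvalid : ∀ i ∈ (T.map (fun t => (((PySem.List.enumerate l 0).foldl
          (fun d p => d.modify (PySem.List.pyGetD p.2 0 "") [] (fun v => v ++ [p.1]))
          PySem.Dict.empty)).getD t [])).flatten, ∃ k : Nat, k < l.length ∧ i = (k : Int) := by
    intro i hi
    obtain ⟨k, hk, hik, _⟩ := (hmem i).1 hi
    exact ⟨k, hk, hik⟩
  apply List.ext_getElem?
  intro k
  rw [pvWrites j _ l hvalid k]
  by_cases hk : k < l.length
  · have hgd : l.getD k [] = l[k] := List.getD_eq_getElem l [] hk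
    have hcanon : (pvCanon T j l)[k]? = some (if PySem.List.pyGetD l[k] 0 "" ∈ T then pvVrow j l[k] else l[k]) := by
      simp [pvCanon, List.getElem?_eq_getElem hk]
    by_cases hin : PySem.List.pyGetD l[k] 0 "" ∈ T
    · have hm : (k : Int) ∈ _ := (hmem (k : Int)).2 ⟨k, hk, rfl, by rw [hgd]; exact hin⟩
      rw [if_pos hm, hcanon, List.getElem?_eq_getElem hk]
      simp [hin]
    · have hm : ¬ ((k : Int) ∈ (T.map (fun t => (((PySem.List.enumerate l 0).foldl
          (fun d p => d.modify (PySem.List.pyGetD p.2 0 "") [] (fun v => v ++ [p.1]))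
          PySem.Dict.empty)).getD t [])).flatten) := by
        intro h
        obtain ⟨k', hk', hkk, hmm⟩ := (hmem (k : Int)).1 h
        have hkeq : k' = k := by omega
        subst hkeq
        rw [hgd] at hmm
        exact hin hmm
      rw [if_neg hm, hcanon, List.getElem?_eq_getElem hk]
      simp [hin]
  · have h1 : l[k]? = none := by simp; omega
    have h2 : (pvCanon T j l)[k]? = none := by
      simp [pvCanon]; omega
    have hm : ¬ ((k : Int) ∈ (T.map (fun t => (((PySem.List.enumerate l 0).foldl
          (fun d p => d.modify (PySem.List.pyGetD p.2 0 "") [] (fun v => v ++ [p.1]))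
          PySem.Dict.empty)).getD t [])).flatten) := by
      intro h
      obtain ⟨k', hk', hkk, _⟩ := (hmem (k : Int)).1 h
      omega
    rw [if_neg hm, h1, h2]

theorem pvCanon_nil (j : String) (l : List (List String)) : pvCanon [] j l = l := by
  simp [pvCanon]

-- ===== VERDICT (by name: the statement is the Claim_ definition above) =====
theorem replace_time_windows_judgment_spec : Claim_equal_replace_time_windows_judgment := by
  intro ao aoa j fl _ _
  unfold Spec_replace_time_windows_judgment
  cases fl with
  | none => cases ao <;> cases aoa <;> rfl
  | some l =>
    cases ao with
    | none =>
      cases aoa with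
      | none => rfl
      | some arr =>
        cases arr with
        | nil => exact congrArg some ((pvA2 [] j l).trans (pvCanon_nil j l))
        | cons t ts => exact congrArg some ((pvA2 (t :: ts) j l).trans (pvB (t :: ts) j l).symm)
    | some o =>
      cases aoa with
      | some arr => rfl
      | none => exact congrArg some ((pvA1 o j l).trans (pvB [o] j l).symm)
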